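-- pv_equiv track=rewrite | github.com/TedBarbier/CryptInsa | backend/cryptage/script_pattern.py | pattern_isomorphique
-- ===== SOURCE A (Python) =====
-- def pattern_isomorphique(mot):
--     """Encode un mot sous forme isomorphique comme 12343"""
--     mapping = {}
--     result = []
--     code = 1
--     for lettre in mot:
--         if lettre not in mapping:
--             mapping[lettre] = str(code)
--             code += 1
--         result.append(mapping[lettre])
--     return ''.join(result)
-- ===== SOURCE B (Python) =====
-- def pattern_isomorphique(mot):
--     """Encode un mot sous forme isomorphique comme 12343"""
--     return ''.join(str(len(set(mot[:mot.index(c) + 1]))) for c in mot)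
-- ===== Notes on version B (the rewrite author's own statement) =====
-- stated objective: alternative
-- what changed: A builds a char->code dict plus a counter in one stateful pass; B keeps no table at all: each letter's code is recomputed independently as the number of distinct letters in the prefix of the word ending at that letter's first occurrence, len(set(mot[:mot.index(c)+1])).
import Mathlib
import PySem

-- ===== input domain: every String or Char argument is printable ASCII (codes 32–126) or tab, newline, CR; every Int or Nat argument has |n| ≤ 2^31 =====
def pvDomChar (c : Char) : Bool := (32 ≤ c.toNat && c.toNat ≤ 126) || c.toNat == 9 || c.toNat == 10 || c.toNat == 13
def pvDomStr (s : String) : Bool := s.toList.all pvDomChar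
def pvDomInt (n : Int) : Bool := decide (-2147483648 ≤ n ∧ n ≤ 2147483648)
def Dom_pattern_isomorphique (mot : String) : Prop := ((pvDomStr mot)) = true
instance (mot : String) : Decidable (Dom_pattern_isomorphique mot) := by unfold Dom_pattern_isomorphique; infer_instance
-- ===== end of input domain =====

-- B drops A's dict+counter state entirely: each letter's code is recomputed independently as
-- the number of distinct letters in the prefix ending at that letter's first occurrence.

-- ===== PORT A =====
-- loop body: 'if lettre not in mapping: mapping[lettre] = str(code); code += 1' then
-- 'result.append(mapping[lettre])'.  mapping[lettre] is ported as getD: the key is always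
-- present at that point, so the default is never used (Python cannot raise here).
def pattern_isomorphique_step (st : PySem.Dict Char String × List String × Int) (lettre : Char) :
    PySem.Dict Char String × List String × Int :=
  let mapping := st.1
  let result := st.2.1
  let code := st.2.2
  let (mapping, code) :=
    if mapping.contains lettre = false then (mapping.insert lettre (PySem.Int.toStr code), code + 1)
    else (mapping, code)
  (mapping, result ++ [mapping.getD lettre ""], code)

def pattern_isomorphique (mot : String) : String :=
  PySem.Str.join "" (mot.toList.foldl pattern_isomorphique_step (PySem.Dict.empty, [], 1)).2.1

-- ===== PORT B =====
-- ''.join(str(len(set(mot[:mot.index(c) + 1]))) for c in mot).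
-- mot.index(c) is ported as (index? …).getD 0: every c of mot is in mot, so the
-- default is never used (Python cannot raise here).
def pattern_isomorphique_alt (mot : String) : String :=
  PySem.Str.join ""
    (mot.toList.map (fun c =>
      let pre := PySem.List.slice mot.toList none
        (some ((((PySem.List.index? mot.toList c).getD 0 : Nat) : Int) + 1))
      PySem.Int.toStr ((PySem.Set.ofList pre).length : Int)))

-- ===== PRECONDITION & SPEC =====
def Spec_pattern_isomorphique (mot : String) (out : String) : Prop := out = pattern_isomorphique_alt mot
instance (mot : String) (out : String) : Decidable (Spec_pattern_isomorphique mot out) := by unfold Spec_pattern_isomorphique; infer_instance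

-- ===== CLAIM (what is proved, stated in full; the proofs are below) =====
def Claim_equal_pattern_isomorphique : Prop := ∀ (mot : String), Dom_pattern_isomorphique mot → Spec_pattern_isomorphique mot (pattern_isomorphique mot)

-- ===== LEMMAS AND PROOFS =====

-- the fold of Set.add only ever appends to its accumulator
lemma foldl_add_prefix {α : Type} [BEq α] (cs : List α) (s : PySem.Set α) :
    ∃ t, cs.foldl PySem.Set.add s = s ++ t := by
  induction cs generalizing s with
  | nil => exact ⟨[], by simp⟩
  | cons c cs ih =>
    obtain ⟨t, ht⟩ := ih (PySem.Set.add s c)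
    rw [List.foldl_cons, ht]
    by_cases h : List.contains s c = true
    · exact ⟨t, by simp [PySem.Set.add, PySem.Set.contains, h]⟩
    · exact ⟨c :: t, by simp [PySem.Set.add, PySem.Set.contains, h]⟩

-- for a letter already seen, its index in the final distinct-letter list is its index in the seen list
lemma index?_foldl_add_of_mem (cs : List Char) (s : List Char) (c : Char) (hc : c ∈ s) :
    PySem.List.index? (cs.foldl PySem.Set.add s) c = PySem.List.index? s c := by
  obtain ⟨t, ht⟩ := foldl_add_prefix cs s
  rw [ht, PySem.List.index?_append_of_mem t hc]

-- dict invariant: mapping's value at c is the rank of c in the seen list, stringified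
def MapInv (d : PySem.Dict Char String) (s : List Char) : Prop :=
  ∀ c, d.get? c = (PySem.List.index? s c).map (fun k => PySem.Int.toStr ((k : Int) + 1))

-- main loop invariant: A's fold, started from a mapping matching the seen list s,
-- appends exactly the ranks (taken in the final distinct list) of the remaining letters
lemma loopA (cs : List Char) : ∀ (s : List Char) (d : PySem.Dict Char String) (acc : List String),
    MapInv d s →
    (cs.foldl pattern_isomorphique_step (d, acc, (s.length : Int) + 1)).2.1 =
      acc ++ cs.map (fun c =>
        PySem.Int.toStr ((((PySem.List.index? (cs.foldl PySem.Set.add s) c).getD 0 : Nat) : Int) + 1)) := by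
  induction cs with
  | nil => intro s d acc _; simp
  | cons c cs ih =>
    intro s d acc hinv
    by_cases hc : c ∈ s
    · -- already seen: mapping and code unchanged
      obtain ⟨k, hk⟩ : ∃ k, PySem.List.index? s c = some k := by
        have := (PySem.List.index?_isSome_iff s c).mpr hc
        exact Option.isSome_iff_exists.mp this
      have hcont : d.contains c = true := by
        rw [PySem.Dict.contains_eq_isSome_get?, hinv c, hk]; rfl
      have hk' : List.idxOf? c s = some k := by simpa using hk
      have hadd : PySem.Set.add s c = s := by
        simp [PySem.Set.add, PySem.Set.contains, hc]
      have hstep : pattern_isomorphique_step (d, acc, (s.length : Int) + 1) c =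
          (d, acc ++ [PySem.Int.toStr ((k : Int) + 1)], (s.length : Int) + 1) := by
        simp only [pattern_isomorphique_step, hcont]
        simp [PySem.Dict.getD_eq_get?_getD, hinv c, hk']
      have hidx : PySem.List.index? (cs.foldl PySem.Set.add s) c = some k := by
        rw [index?_foldl_add_of_mem cs s c hc, hk]
      simp only [List.foldl_cons, hstep, ih s d _ hinv, List.map_cons, hadd, hidx, Option.getD_some]
      simp
    · -- new letter: insert it with the current code, code increments
      have hnone : PySem.List.index? s c = none := (PySem.List.index?_eq_none_iff s c).mpr hc
      have hcont : d.contains c = false := by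
        rw [PySem.Dict.contains_eq_isSome_get?, hinv c, hnone]; rfl
      have hadd : PySem.Set.add s c = s ++ [c] := by
        simp [PySem.Set.add, PySem.Set.contains, hc]
      set d' := d.insert c (PySem.Int.toStr ((s.length : Int) + 1)) with hd'
      have hstep : pattern_isomorphique_step (d, acc, (s.length : Int) + 1) c =
          (d', acc ++ [PySem.Int.toStr ((s.length : Int) + 1)], ((s.length : Int) + 1) + 1) := by
        simp only [pattern_isomorphique_step, hcont]
        simp [hd', PySem.Dict.getD_eq_get?_getD, PySem.Dict.get?_insert_self]
      have hinv' : MapInv d' (s ++ [c]) := by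
        intro c'
        rw [hd', PySem.Dict.get?_insert]
        by_cases hcc : c' = c
        · rw [if_pos hcc, hcc, PySem.List.index?_append_singleton_self s c hc]
          simp
        · rw [if_neg hcc, hinv c']
          by_cases hms : c' ∈ s
          · rw [PySem.List.index?_append_of_mem [c] hms]
          · have h1 : PySem.List.index? s c' = none := (PySem.List.index?_eq_none_iff s c').mpr hms
            have h2 : PySem.List.index? (s ++ [c]) c' = none := by
              rw [PySem.List.index?_eq_none_iff]
              simp [hms, hcc]
            rw [h1, h2]
      have hlen : ((s ++ [c]).length : Int) + 1 = ((s.length : Int) + 1) + 1 := by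
        simp
      have hidx : PySem.List.index? (cs.foldl PySem.Set.add (s ++ [c])) c = some s.length := by
        rw [index?_foldl_add_of_mem cs (s ++ [c]) c (by simp),
          PySem.List.index?_append_singleton_self s c hc]
      have := ih (s ++ [c]) d' (acc ++ [PySem.Int.toStr ((s.length : Int) + 1)]) hinv'
      rw [hlen] at this
      simp only [List.foldl_cons, hstep, this, List.map_cons, hadd, hidx, Option.getD_some]
      simp

-- key lemma for B: for c ∈ l starting from seen-set s not containing c, the number of distinct
-- letters in the prefix of l ending at c's first occurrence (accumulated onto s) is one more
-- than c's rank in the final distinct-letter list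
lemma distinct_prefix_count (l : List Char) : ∀ (s : PySem.Set Char) (c : Char), c ∈ l → c ∉ s →
    ((l.take (((PySem.List.index? l c).getD 0) + 1)).foldl PySem.Set.add s).length
      = ((PySem.List.index? (l.foldl PySem.Set.add s) c).getD 0) + 1 := by
  induction l with
  | nil => intro s c hc _; cases hc
  | cons a t ih =>
    intro s c hc hs
    by_cases hca : c = a
    · subst hca
      have hidx : PySem.List.index? (c :: t) c = some 0 := by
        simpa using PySem.List.index?_cons_self c t
      have haddc : PySem.Set.add s c = s ++ [c] := by
        simp [PySem.Set.add, PySem.Set.contains, hs]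
      have hridx : PySem.List.index? ((c :: t).foldl PySem.Set.add s) c = some s.length := by
        rw [List.foldl_cons, haddc, index?_foldl_add_of_mem t (s ++ [c]) c (by simp),
          PySem.List.index?_append_singleton_self s c hs]
      rw [hidx, hridx]
      simp [haddc]
    · have hct : c ∈ t := by
        cases hc with
        | head => exact absurd rfl hca
        | tail _ h => exact h
      obtain ⟨k, hk⟩ : ∃ k, PySem.List.index? t c = some k := by
        have := (PySem.List.index?_isSome_iff t c).mpr hct
        exact Option.isSome_iff_exists.mp this
      have hidx : PySem.List.index? (a :: t) c = some (k + 1) := by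
        rw [PySem.List.index?_cons_of_ne t (fun h => hca h.symm), hk]; rfl
      have hcs' : c ∉ PySem.Set.add s a := by
        rw [PySem.Set.mem_add]
        rintro (h | h)
        · exact hs h
        · exact hca h
      have := ih (PySem.Set.add s a) c hct hcs'
      rw [hk] at this
      rw [hidx]
      simpa using this

-- ===== VERDICT (by name: the statement is the Claim_ definition above) =====
set_option maxHeartbeats 1000000 in
theorem pattern_isomorphique_spec : Claim_equal_pattern_isomorphique := by
  intro mot _
  unfold Spec_pattern_isomorphique pattern_isomorphique pattern_isomorphique_alt
  have hinv : MapInv PySem.Dict.empty ([] : List Char) := by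
    intro c; simp [PySem.Dict.get?_empty, PySem.List.index?]
  have h := loopA mot.toList [] PySem.Dict.empty [] hinv
  simp only [List.length_nil, Nat.cast_zero, zero_add, List.nil_append] at h
  rw [h]
  congr 1
  apply List.map_congr_left
  intro c hc
  have hslice : PySem.List.slice mot.toList none
      (some ((((PySem.List.index? mot.toList c).getD 0 : Nat) : Int) + 1))
      = mot.toList.take (((PySem.List.index? mot.toList c).getD 0) + 1) := by
    have hb : (0 : Int) ≤ (((PySem.List.index? mot.toList c).getD 0 : Nat) : Int) + 1 := by
      omega
    rw [PySem.List.slice_to _ hb]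
    congr 1
  rw [hslice]
  have hkey := distinct_prefix_count mot.toList [] c hc (by simp)
  congr 1
  rw [PySem.Set.ofList_eq_foldl, hkey]
  push_cast
  ring
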